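-- pv_equiv track=rewrite | github.com/poutine-dejeuner/hodgelaplacians | hodgelaplacians/hodgelaplacians.py | _faces
-- ===== SOURCE A (Python) =====
-- from itertools import combinations
--
-- def _faces(simplices):
--     """This function used to return a set but this had the annoying consequence of
--     defining the operators with a different ordering of the nodes thant the natural
--     one when the nodes are named by integers. Returning a sorted list solves the problem """
--     faceset = set()
--     for simplex in simplices:
--         numnodes = len(simplex)
--         for r in range(numnodes, 0, -1):
--             for face in combinations(simplex, r):
--                     faceset.add(tuple(face))
--     return tuple(sorted(faceset))
-- ===== SOURCE B (Python) =====
-- def _faces(simplices):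
--     faceset = set()
--     for simplex in simplices:
--         for mask in range(1, 1 << len(simplex)):
--             face = []
--             m = mask
--             for x in simplex:
--                 if m & 1:
--                     face.append(x)
--                 m >>= 1
--             faceset.add(tuple(face))
--     return tuple(sorted(faceset))
-- ===== Notes on version B (the rewrite author's own statement) =====
-- stated objective: alternative
-- what changed: Replaces the nested r-loop over itertools.combinations with a single integer-bitmask loop per simplex that enumerates every non-empty subset by testing bits while walking the simplex once.
import Mathlib
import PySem

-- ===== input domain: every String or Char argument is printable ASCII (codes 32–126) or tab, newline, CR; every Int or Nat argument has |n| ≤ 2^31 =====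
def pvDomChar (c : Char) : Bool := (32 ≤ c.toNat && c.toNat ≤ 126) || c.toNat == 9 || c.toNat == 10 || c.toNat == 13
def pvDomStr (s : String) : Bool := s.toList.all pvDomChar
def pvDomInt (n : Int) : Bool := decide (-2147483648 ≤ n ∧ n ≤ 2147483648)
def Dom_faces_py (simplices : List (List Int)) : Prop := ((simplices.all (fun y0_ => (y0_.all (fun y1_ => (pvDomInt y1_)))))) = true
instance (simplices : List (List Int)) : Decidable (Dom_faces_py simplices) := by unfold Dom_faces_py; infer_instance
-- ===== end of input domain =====

-- B replaces the nested r-loop + itertools.combinations with a single integer-bitmask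
-- subset enumeration per simplex (alternative decomposition, same asymptotic cost).


-- ===== PORT A =====
def faces_py (simplices : List (List Int)) : List (List Int) :=
  PySem.List.sorted
    (simplices.foldl (fun faceset simplex =>
      (PySem.List.pyRange (simplex.length : Int) 0 (-1)).foldl (fun faceset r =>
        (PySem.List.combinations simplex r.toNat).foldl
          (fun faceset face => PySem.Set.add faceset face) faceset) faceset)
      PySem.Set.empty)
    (fun x => x) false

-- ===== PORT B =====
def faces_py_alt (simplices : List (List Int)) : List (List Int) :=
  PySem.List.sorted
    (simplices.foldl (fun faceset simplex =>
      (PySem.List.pyRange 1 ((1 : Int) <<< (simplex.length : Int)) 1).foldl (fun faceset mask =>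
        PySem.Set.add faceset
          (simplex.foldl (fun (st : List Int × Int) x =>
            (if PySem.Int.band st.2 1 ≠ 0 then st.1 ++ [x] else st.1, st.2 >>> (1 : Nat)))
            ([], mask)).1) faceset)
      PySem.Set.empty)
    (fun x => x) false

-- ===== PRECONDITION & SPEC =====
def Spec_faces_py (simplices : List (List Int)) (out : List (List Int)) : Prop := out = faces_py_alt simplices
instance (simplices : List (List Int)) (out : List (List Int)) : Decidable (Spec_faces_py simplices out) := by unfold Spec_faces_py; infer_instance

-- ===== CLAIM (what is proved, stated in full; the proofs are below) =====
def Claim_equal_faces_py : Prop := ∀ (simplices : List (List Int)), Dom_faces_py simplices → Spec_faces_py simplices (faces_py simplices)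

-- ===== LEMMAS AND PROOFS =====

-- membership and nodup of a plain `foldl Set.add` loop
theorem mem_foldl_setadd (L : List (List Int)) (fs : PySem.Set (List Int)) (y : List Int) :
    y ∈ L.foldl PySem.Set.add fs ↔ y ∈ fs ∨ y ∈ L := by
  induction L generalizing fs with
  | nil => simp
  | cons a t ih => simp [List.foldl_cons, ih, PySem.Set.mem_add]; tauto

theorem nodup_foldl_setadd (L : List (List Int)) (fs : PySem.Set (List Int))
    (h : fs.Nodup) : (L.foldl PySem.Set.add fs).Nodup := by
  induction L generalizing fs with
  | nil => exact h
  | cons a t ih => exact ih _ (PySem.Set.nodup_add fs a h)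

-- bsel s m = the face B extracts from simplex s with bitmask m
def bsel : List Int → Int → List Int
  | [], _ => []
  | x :: s, m =>
      if PySem.Int.band m 1 ≠ 0 then x :: bsel s (m >>> (1 : Nat)) else bsel s (m >>> (1 : Nat))

theorem bfold (s : List Int) (acc : List Int) (m : Int) :
    (s.foldl (fun (st : List Int × Int) x =>
      (if PySem.Int.band st.2 1 ≠ 0 then st.1 ++ [x] else st.1, st.2 >>> (1 : Nat)))
      (acc, m)).1 = acc ++ bsel s m := by
  induction s generalizing acc m with
  | nil => simp [bsel]
  | cons a t ih =>
    rw [List.foldl_cons]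
    simp only [bsel]
    by_cases h : PySem.Int.band m 1 ≠ 0
    · rw [if_pos h, if_pos h, ih]; simp
    · rw [if_neg h, if_neg h, ih]

theorem bsel_sublist (s : List Int) (m : Int) : (bsel s m).Sublist s := by
  induction s generalizing m with
  | nil => simp [bsel]
  | cons a t ih =>
    simp only [bsel]
    by_cases h : PySem.Int.band m 1 ≠ 0
    · rw [if_pos h]; exact (ih _).cons_cons a
    · rw [if_neg h]; exact (ih _).cons a

theorem band_one_eq_emod (m : Int) : PySem.Int.band m 1 = m % 2 := by
  rw [PySem.Int.band_one, PySem.Int.mod_eq_emod_of_pos (by norm_num)]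

theorem shift_one_eq_div (m : Int) : (m >>> (1 : Nat)) = m / 2 := by
  rw [Int.shiftRight_eq_div_pow]; norm_num

theorem bsel_ne_nil (s : List Int) (m : Int) (h1 : 0 < m) (h2 : m < 2 ^ s.length) :
    bsel s m ≠ [] := by
  induction s generalizing m with
  | nil => exfalso; simp at h2; omega
  | cons a t ih =>
    by_cases h : PySem.Int.band m 1 ≠ 0
    · simp [bsel, h]
    · simp only [bsel, h, if_false]
      rw [band_one_eq_emod] at h
      rw [shift_one_eq_div]
      have hp : (0 : Int) < 2 ^ t.length := by positivity
      rw [List.length_cons, pow_succ] at h2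
      exact ih (m / 2) (by omega) (by omega)

theorem bsel_zero (s : List Int) : bsel s 0 = [] := by
  induction s with
  | nil => simp [bsel]
  | cons a t ih => simp [bsel, band_one_eq_emod, shift_one_eq_div, ih]

theorem bsel_surj (s : List Int) (y : List Int) (hy : y.Sublist s) (hne : y ≠ []) :
    ∃ m : Int, 0 < m ∧ m < 2 ^ s.length ∧ bsel s m = y := by
  induction s generalizing y with
  | nil => simp at hy; exact absurd hy hne
  | cons a t ih =>
    rcases List.sublist_cons_iff.mp hy with h | ⟨r, rfl, hr⟩
    · rcases ih y h hne with ⟨m, h1, h2, h3⟩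
      refine ⟨2 * m, by omega, ?_, ?_⟩
      · rw [List.length_cons, pow_succ]; omega
      · have heven : (2 * m) % 2 = 0 := by omega
        have hdiv : (2 * m) / 2 = m := by omega
        simp [bsel, band_one_eq_emod, shift_one_eq_div, heven, hdiv, h3]
    · by_cases hr0 : r = []
      · subst hr0
        refine ⟨1, by omega, ?_, ?_⟩
        · have hp : (1 : Int) < 2 ^ t.length * 2 := by
            have : (0 : Int) < 2 ^ t.length := by positivity
            omega
          rw [List.length_cons, pow_succ]; omega
        · simp [bsel, shift_one_eq_div, bsel_zero]
      · rcases ih r hr hr0 with ⟨m, h1, h2, h3⟩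
        refine ⟨2 * m + 1, by omega, ?_, ?_⟩
        · rw [List.length_cons, pow_succ]; omega
        · have hodd : (2 * m + 1) % 2 = 1 := by omega
          have hdiv : (2 * m + 1) / 2 = m := by omega
          simp [bsel, band_one_eq_emod, shift_one_eq_div, hodd, hdiv, h3]

-- per-simplex face sets: both enumerations produce exactly the non-empty sublists
theorem memA (s : List Int) (y : List Int) :
    y ∈ (PySem.List.pyRange (s.length : Int) 0 (-1)).flatMap
        (fun r => PySem.List.combinations s r.toNat) ↔ y.Sublist s ∧ y ≠ [] := by
  simp only [List.mem_flatMap, PySem.List.mem_pyRange_neg_one, PySem.List.mem_combinations_iff]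
  constructor
  · rintro ⟨r, ⟨hr0, hrn⟩, hsub, hlen⟩
    refine ⟨hsub, ?_⟩
    intro h; subst h; simp at hlen; omega
  · rintro ⟨hsub, hne⟩
    refine ⟨(y.length : Int), ⟨?_, ?_⟩, hsub, by simp⟩
    · have : y.length ≠ 0 := fun h => hne (List.eq_nil_of_length_eq_zero h)
      omega
    · exact_mod_cast hsub.length_le

theorem memB (s : List Int) (y : List Int) :
    y ∈ (PySem.List.pyRange 1 ((1 : Int) <<< (s.length : Int)) 1).map (fun m => bsel s m) ↔
      y.Sublist s ∧ y ≠ [] := by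
  have hsh : ((1 : Int) <<< (s.length : Int)) = 2 ^ s.length := by
    rw [Int.one_shiftLeft]; push_cast; ring
  simp only [List.mem_map, PySem.List.mem_pyRange_iff_of_pos (by norm_num : (0:Int) < 1), hsh]
  constructor
  · rintro ⟨m, ⟨h1, h2, -⟩, rfl⟩
    exact ⟨bsel_sublist s m, bsel_ne_nil s m (by omega) h2⟩
  · rintro ⟨hsub, hne⟩
    rcases bsel_surj s y hsub hne with ⟨m, h1, h2, h3⟩
    exact ⟨m, ⟨by omega, h2, ⟨m - 1, by ring⟩⟩, h3⟩

theorem sorted_bridge (xs : List (List Int)) :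
    @PySem.List.sorted (List Int) (List Int) List.instLT (fun a b => a.decidableLT b) xs (fun x => x) false
    = @PySem.List.sorted (List Int) (List Int) List.instLT LinearOrder.toDecidableLT xs (fun x => x) false := by
  have hinst : (fun (a b : List Int) => a.decidableLT b) = (LinearOrder.toDecidableLT : DecidableLT (List Int)) := by
    funext a b; exact Subsingleton.elim _ _
  rw [hinst]

theorem faces_eq (simplices : List (List Int)) : faces_py simplices = faces_py_alt simplices := by
  unfold faces_py faces_py_alt
  have hA : simplices.foldl (fun faceset simplex =>
      (PySem.List.pyRange (simplex.length : Int) 0 (-1)).foldl (fun faceset r =>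
        (PySem.List.combinations simplex r.toNat).foldl
          (fun faceset face => PySem.Set.add faceset face) faceset) faceset)
      PySem.Set.empty
      = (simplices.flatMap (fun s => (PySem.List.pyRange (s.length : Int) 0 (-1)).flatMap
          (fun r => PySem.List.combinations s r.toNat))).foldl PySem.Set.add ([] : PySem.Set (List Int)) := by
    rw [List.foldl_flatMap]
    apply PySem.List.foldl_congr_mem
    intro acc s _
    rw [List.foldl_flatMap]
  have hB : simplices.foldl (fun faceset simplex =>
      (PySem.List.pyRange 1 ((1 : Int) <<< (simplex.length : Int)) 1).foldl (fun faceset mask =>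
        PySem.Set.add faceset
          (simplex.foldl (fun (st : List Int × Int) x =>
            (if PySem.Int.band st.2 1 ≠ 0 then st.1 ++ [x] else st.1, st.2 >>> (1 : Nat)))
            ([], mask)).1) faceset)
      PySem.Set.empty
      = (simplices.flatMap (fun s => (PySem.List.pyRange 1 ((1 : Int) <<< (s.length : Int)) 1).map
          (fun m => bsel s m))).foldl PySem.Set.add ([] : PySem.Set (List Int)) := by
    rw [List.foldl_flatMap]
    apply PySem.List.foldl_congr_mem
    intro acc s _
    rw [List.foldl_map]
    apply PySem.List.foldl_congr_mem
    intro acc m _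
    rw [bfold s [] m]
    simp
  rw [hA, hB, sorted_bridge, sorted_bridge]
  refine PySem.List.sorted_eq_sorted_of_perm _ _ (fun x : List Int => x) (fun a b h => h) ?_
  rw [List.perm_ext_iff_of_nodup (nodup_foldl_setadd _ _ List.nodup_nil)
    (nodup_foldl_setadd _ _ List.nodup_nil)]
  intro y
  rw [mem_foldl_setadd, mem_foldl_setadd]
  constructor
  · rintro (h | h)
    · cases h
    · rcases List.mem_flatMap.mp h with ⟨s, hs, hy⟩
      exact Or.inr (List.mem_flatMap.mpr ⟨s, hs, (memB s y).mpr ((memA s y).mp hy)⟩)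
  · rintro (h | h)
    · cases h
    · rcases List.mem_flatMap.mp h with ⟨s, hs, hy⟩
      exact Or.inr (List.mem_flatMap.mpr ⟨s, hs, (memA s y).mpr ((memB s y).mp hy)⟩)

-- ===== VERDICT (by name: the statement is the Claim_ definition above) =====
theorem faces_py_spec : Claim_equal_faces_py := by
  intro simplices _
  unfold Spec_faces_py
  exact faces_eq simplices
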